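-- pv_equiv track=rewrite | github.com/OvePa/DSA | educative/Lists/rearrange_pos_neg.py | rearrange1
-- ===== SOURCE A (Python) =====
-- def rearrange1(lst):
--     neg = []
--     pos = []
--     # make a list of negative and positive numbers
--     for ele in lst:
--         if ele < 0:
--             neg.append(ele)
--         else:
--             pos.append(ele)
--     # merge two lists and return
--     return neg + pos
-- ===== SOURCE B (Python) =====
-- def rearrange1(lst):
--     # stable sort by boolean key: negatives (key False) before non-negatives (key True)
--     return sorted(lst, key=lambda x: x >= 0)
-- ===== Notes on version B (the rewrite author's own statement) =====
-- stated objective: idiomatic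
-- what changed: Replaces the explicit two-accumulator partition loop with a single stable sorted() call keyed on the boolean sign test, whose stability preserves each group's original order.
import Mathlib
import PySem

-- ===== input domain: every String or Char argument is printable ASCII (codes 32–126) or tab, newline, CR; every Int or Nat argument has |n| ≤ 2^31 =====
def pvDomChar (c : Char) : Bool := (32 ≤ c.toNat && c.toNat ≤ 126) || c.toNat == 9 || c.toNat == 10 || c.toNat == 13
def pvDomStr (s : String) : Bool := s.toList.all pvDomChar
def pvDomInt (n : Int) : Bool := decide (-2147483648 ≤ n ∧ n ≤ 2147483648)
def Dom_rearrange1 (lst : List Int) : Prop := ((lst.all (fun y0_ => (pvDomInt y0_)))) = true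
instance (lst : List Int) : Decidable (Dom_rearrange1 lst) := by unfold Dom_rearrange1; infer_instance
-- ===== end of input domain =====

-- B replaces A's explicit two-list partition loop with one stable sorted() call keyed
-- on the boolean sign test (objective: idiomatic); same return value, no side effects.

-- ===== PORT A =====
def rearrange1 (lst : List Int) : List Int :=
  let s := lst.foldl
    (fun (acc : List Int × List Int) ele =>
      if ele < 0 then (acc.1 ++ [ele], acc.2) else (acc.1, acc.2 ++ [ele]))
    ([], [])
  s.1 ++ s.2

-- ===== PORT B =====
def rearrange1_alt (lst : List Int) : List Int :=
  PySem.List.sorted lst (fun x => decide (0 ≤ x)) false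

-- ===== PRECONDITION & SPEC =====
def Spec_rearrange1 (lst : List Int) (out : List Int) : Prop := out = rearrange1_alt lst
instance (lst : List Int) (out : List Int) : Decidable (Spec_rearrange1 lst out) := by unfold Spec_rearrange1; infer_instance

-- ===== CLAIM (what is proved, stated in full; the proofs are below) =====
def Claim_equal_rearrange1 : Prop := ∀ (lst : List Int), Dom_rearrange1 lst → Spec_rearrange1 lst (rearrange1 lst)

-- ===== LEMMAS AND PROOFS =====

-- the comparison used by the insertion sort with the boolean key
def pvBefore (a b : Int) : Bool := decide ((decide (0 ≤ a)) < (decide (0 ≤ b)))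

lemma pvBefore_neg_nonneg {x y : Int} (hx : x < 0) (hy : 0 ≤ y) : pvBefore x y = true := by
  simp [pvBefore, Bool.lt_iff]; omega

lemma pvBefore_of_neg_right {x y : Int} (hy : y < 0) : pvBefore x y = false := by
  simp [pvBefore, Bool.lt_iff]; omega

lemma pvBefore_of_nonneg_left {x y : Int} (hx : 0 ≤ x) : pvBefore x y = false := by
  simp [pvBefore, Bool.lt_iff]; omega

-- inserting a negative element lands exactly between the negative prefix and the non-negative suffix
lemma insertBy_neg (x : Int) (hx : x < 0) (n p : List Int)
    (hn : ∀ y ∈ n, y < 0) (hp : ∀ y ∈ p, 0 ≤ y) :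
    PySem.List.insertBy pvBefore x (n ++ p) = n ++ x :: p := by
  induction n with
  | nil =>
    cases p with
    | nil => rfl
    | cons q t =>
      simp [PySem.List.insertBy, pvBefore_neg_nonneg hx (hp q (by simp))]
  | cons a n' ih =>
    have ha : a < 0 := hn a (by simp)
    simp [PySem.List.insertBy, pvBefore_of_neg_right ha]
    exact ih (fun y hy => hn y (by simp [hy]))

-- inserting a non-negative element appends it at the end
lemma insertBy_nonneg (x : Int) (hx : 0 ≤ x) (ys : List Int) :
    PySem.List.insertBy pvBefore x ys = ys ++ [x] :=
  PySem.List.insertBy_of_forall_not_before pvBefore x ys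
    (fun _ _ => pvBefore_of_nonneg_left hx)

-- loop invariant: the insertion-sort fold over any split accumulator equals A's partition fold
lemma fold_eq (lst : List Int) : ∀ (n p : List Int),
    (∀ y ∈ n, y < 0) → (∀ y ∈ p, 0 ≤ y) →
    lst.foldl (fun acc x => PySem.List.insertBy pvBefore x acc) (n ++ p)
      = (lst.foldl
          (fun (acc : List Int × List Int) ele =>
            if ele < 0 then (acc.1 ++ [ele], acc.2) else (acc.1, acc.2 ++ [ele]))
          (n, p)).1
        ++ (lst.foldl
          (fun (acc : List Int × List Int) ele =>
            if ele < 0 then (acc.1 ++ [ele], acc.2) else (acc.1, acc.2 ++ [ele]))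
          (n, p)).2 := by
  induction lst with
  | nil => intro n p _ _; simp
  | cons x t ih =>
    intro n p hn hp
    by_cases hx : x < 0
    · simp only [List.foldl_cons, insertBy_neg x hx n p hn hp, if_pos hx]
      have : n ++ x :: p = (n ++ [x]) ++ p := by simp
      rw [this]
      exact ih (n ++ [x]) p
        (by intro y hy; rcases List.mem_append.1 hy with h | h
            · exact hn y h
            · simp at h; omega)
        hp
    · simp only [List.foldl_cons, insertBy_nonneg x (by omega) (n ++ p), if_neg hx,
        List.append_assoc]
      exact ih n (p ++ [x]) hn
        (by intro y hy; rcases List.mem_append.1 hy with h | h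
            · exact hp y h
            · simp at h; omega)

-- ===== VERDICT (by name: the statement is the Claim_ definition above) =====
theorem rearrange1_spec : Claim_equal_rearrange1 := by
  intro lst _
  unfold Spec_rearrange1 rearrange1 rearrange1_alt
  rw [PySem.List.sorted_eq_foldl_insertBy]
  exact (fold_eq lst [] [] (by simp) (by simp)).symm
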